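-- pv_equiv track=rewrite | github.com/oops-p-creater/Leetcode | arth.py | check
-- ===== SOURCE A (Python) =====
-- def check(l):
--     c=1
--     final=0
--     l.sort()
--     for i in range(len(l)-1):
--         if(abs(l[i+1]-l[i])==1):
--             c=c+1
--         else:
--             c=1
--             final=max(c,final)
--     return max(c,final)
-- ===== SOURCE B (Python) =====
-- def check(l):
--     l.sort()
--     cnt = 1
--     j = len(l) - 1
--     while j > 0 and l[j] - l[j - 1] == 1:
--         cnt += 1
--         j -= 1
--     return cnt
-- ===== Notes on version B (the rewrite author's own statement) =====
-- stated objective: simpler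
-- what changed: Replaces A's forward full scan carrying a counter-and-max pair (whose 'final' can in fact never exceed 1) with a backward walk from the sorted maximum that counts unit gaps and stops at the first break.
import Mathlib
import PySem

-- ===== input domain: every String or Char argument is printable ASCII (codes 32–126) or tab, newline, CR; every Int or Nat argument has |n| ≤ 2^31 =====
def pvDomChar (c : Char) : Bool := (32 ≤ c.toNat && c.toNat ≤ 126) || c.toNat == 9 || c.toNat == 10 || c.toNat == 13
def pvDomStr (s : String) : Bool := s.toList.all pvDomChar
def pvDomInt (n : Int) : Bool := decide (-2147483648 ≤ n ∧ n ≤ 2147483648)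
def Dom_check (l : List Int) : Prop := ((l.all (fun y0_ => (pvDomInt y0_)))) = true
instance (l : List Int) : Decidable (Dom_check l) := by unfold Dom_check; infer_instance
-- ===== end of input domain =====

-- B replaces A's forward scan with counter+max state by a backward walk from the sorted
-- maximum that stops at the first non-unit gap (objective: simpler). Both A and B sort
-- the argument list in place in Python; the equivalence proved here is about the return value.

-- ===== PORT A =====
-- loop body of A's for-loop: state (c, final), index i
def stepA (s : List Int) (p : Int × Int) (i : Int) : Int × Int :=
  if (PySem.List.pyGetD s (i + 1) 0 - PySem.List.pyGetD s i 0).natAbs = 1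
  then (p.1 + 1, p.2)
  else (1, max 1 p.2)

def check (l : List Int) : Int :=
  let s := PySem.List.sorted l (fun x => x)
  let st := (PySem.List.pyRange 0 ((s.length : Int) - 1) 1).foldl (stepA s) (1, 0)
  max st.1 st.2

-- ===== PORT B =====
-- B's while-loop: cnt accumulated while walking j downward from the top index
def altCount (s : List Int) : Nat → Int
  | 0 => 1
  | j + 1 =>
    if PySem.List.pyGetD s ((j : Int) + 1) 0 - PySem.List.pyGetD s (j : Int) 0 = 1
    then 1 + altCount s j
    else 1

def check_alt (l : List Int) : Int :=
  let s := PySem.List.sorted l (fun x => x)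
  altCount s (s.length - 1)

-- ===== PRECONDITION & SPEC =====
def Spec_check (l : List Int) (out : Int) : Prop := out = check_alt l
instance (l : List Int) (out : Int) : Decidable (Spec_check l out) := by unfold Spec_check; infer_instance

-- ===== CLAIM (what is proved, stated in full; the proofs are below) =====
def Claim_equal_check : Prop := ∀ (l : List Int), Dom_check l → Spec_check l (check l)

-- ===== LEMMAS AND PROOFS =====

lemma altCount_ge_one (s : List Int) : ∀ n : Nat, 1 ≤ altCount s n := by
  intro n
  induction n with
  | zero => simp [altCount]
  | succ j ih =>
    simp only [altCount]
    split <;> omega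

-- invariant of A's fold: first component equals B's backward count, second stays in [0,1]
lemma foldA_eq (s : List Int) (hs : s.Pairwise (· ≤ ·)) :
    ∀ n : Nat, n + 1 ≤ s.length →
      ((PySem.List.pyRange 0 (n : Int) 1).foldl (stepA s) (1, 0)).1 = altCount s n ∧
      0 ≤ ((PySem.List.pyRange 0 (n : Int) 1).foldl (stepA s) (1, 0)).2 ∧
      ((PySem.List.pyRange 0 (n : Int) 1).foldl (stepA s) (1, 0)).2 ≤ 1 := by
  intro n
  induction n with
  | zero =>
    intro _
    rw [PySem.List.pyRange_one_eq_nil (by norm_num)]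
    simp [altCount]
  | succ m ih =>
    intro h
    have hm : m + 1 ≤ s.length := by omega
    obtain ⟨ih1, ih2, ih3⟩ := ih hm
    have hcast : ((m + 1 : Nat) : Int) = (m : Int) + 1 := by push_cast; ring
    rw [hcast, PySem.List.pyRange_one_succ_right (by positivity), List.foldl_append]
    simp only [List.foldl_cons, List.foldl_nil]
    have h1 : ((m : Int) + 1) < (s.length : Int) := by omega
    have h0 : (0 : Int) ≤ (m : Int) := by positivity
    have e1 : PySem.List.pyGetD s ((m : Int) + 1) 0 = s[((m : Int) + 1).toNat] :=
      PySem.List.pyGetD_eq_getElem s 0 (by omega) h1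
    have e0 : PySem.List.pyGetD s (m : Int) 0 = s[((m : Int)).toNat] :=
      PySem.List.pyGetD_eq_getElem s 0 h0 (by omega)
    have ht1 : ((m : Int) + 1).toNat = m + 1 := by omega
    have ht0 : ((m : Int)).toNat = m := by omega
    have hle : s[m]'(by omega) ≤ s[m + 1]'(by omega) :=
      (List.pairwise_iff_getElem.mp hs) m (m + 1) (by omega) (by omega) (by omega)
    have hd : (0 : Int) ≤ s[m + 1]'(by omega) - s[m]'(by omega) := by omega
    generalize hq : (PySem.List.pyRange 0 (m : Int) 1).foldl (stepA s) ((1 : Int), (0 : Int)) = q at ih1 ih2 ih3 ⊢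
    unfold stepA
    rw [e1, e0]
    simp only [ht1, ht0]
    have hcond : ((s[m + 1]'(by omega) - s[m]'(by omega)).natAbs = 1) ↔
        (s[m + 1]'(by omega) - s[m]'(by omega) = 1) := by omega
    by_cases hc : s[m + 1]'(by omega) - s[m]'(by omega) = 1
    · rw [if_pos (hcond.mpr hc)]
      simp only [altCount]
      rw [e1, e0]
      simp only [ht1, ht0]
      rw [if_pos hc]
      exact ⟨by omega, ih2, ih3⟩
    · rw [if_neg (fun h' => hc (hcond.mp h'))]
      simp only [altCount]
      rw [e1, e0]
      simp only [ht1, ht0]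
      rw [if_neg hc]
      exact ⟨rfl, by omega, by omega⟩

lemma check_eq_alt (l : List Int) : check l = check_alt l := by
  unfold check check_alt
  set s := PySem.List.sorted l (fun x => x) with hsdef
  have hs : s.Pairwise (· ≤ ·) := PySem.List.sorted_pairwise l (fun x => x)
  cases hlen : s.length with
  | zero =>
    simp only [hlen]
    rw [show ((0 : Nat) : Int) - 1 = (-1 : Int) by norm_num,
      PySem.List.pyRange_one_eq_nil (by norm_num)]
    simp [altCount]
  | succ k =>
    simp only [hlen]
    have hcast : ((k + 1 : Nat) : Int) - 1 = (k : Int) := by push_cast; ring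
    rw [hcast]
    obtain ⟨h1, h2, h3⟩ := foldA_eq s hs k (by omega)
    have hk1 : k + 1 - 1 = k := by omega
    rw [hk1, h1]
    have := altCount_ge_one s k
    omega

-- ===== VERDICT (by name: the statement is the Claim_ definition above) =====
theorem check_spec : Claim_equal_check := by
  intro l _
  unfold Spec_check
  exact check_eq_alt l
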